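-- pv_equiv track=rewrite | github.com/ydb-platform/ydb | contrib/python/pypdfium2/tools/update_syms.py | strip_excluded_ifdefs
-- ===== SOURCE A (Python) =====
-- EXCLUDED_IFDEFS = {"_WIN32", "PDF_ENABLE_V8", "PDF_USE_SKIA", "PDF_ENABLE_XFA"}
--
-- def strip_excluded_ifdefs(content: str) -> str:
--     """
--     Удаляет из содержимого header-а блоки #ifdef/#if defined(COND)...#endif
--     для условий из EXCLUDED_IFDEFS.
--
--     Обрабатывает вложенность: если внутри исключаемого блока есть
--     другие #if/#ifdef, они тоже пропускаются до правильного #endif.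
--     """
--     lines = content.split("\n")
--     result = []
--     skip_depth = 0  # > 0 означает что мы внутри исключаемого блока
--
--     for line in lines:
--         stripped = line.strip()
--
--         if skip_depth > 0:
--             # Внутри исключаемого блока: считаем вложенность
--             if stripped.startswith("#if"):
--                 skip_depth += 1
--             elif stripped.startswith("#endif"):
--                 skip_depth -= 1
--             continue
--
--         # Проверяем, начинается ли исключаемый блок
--         # Форматы: #ifdef _WIN32, #if defined(_WIN32), #if defined(PDF_USE_SKIA)
--         should_skip = False
--         if stripped.startswith("#ifdef "):
--             cond = stripped[len("#ifdef "):].strip()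
--             if cond in EXCLUDED_IFDEFS:
--                 should_skip = True
--         elif stripped.startswith("#if "):
--             for exc in EXCLUDED_IFDEFS:
--                 if f"defined({exc})" in stripped:
--                     should_skip = True
--                     break
--
--         if should_skip:
--             skip_depth = 1
--             continue
--
--         result.append(line)
--
--     return "\n".join(result)
-- ===== SOURCE B (Python) =====
-- EXCLUDED_IFDEFS = {"_WIN32", "PDF_ENABLE_V8", "PDF_USE_SKIA", "PDF_ENABLE_XFA"}
--
-- def _opens_excluded(stripped):
--     # does this (stripped) line open an excluded #ifdef/#if defined(...) block?
--     if stripped.startswith("#ifdef "):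
--         return stripped[len("#ifdef "):].strip() in EXCLUDED_IFDEFS
--     if stripped.startswith("#if "):
--         return any(f"defined({exc})" in stripped for exc in EXCLUDED_IFDEFS)
--     return False
--
-- def _excluded_ranges(lines):
--     # phase 1: half-open [start, end) line-index ranges of the excluded blocks
--     # (an unmatched opener yields a range running to the end of the file)
--     ranges = []
--     depth = 0
--     start = 0
--     for k, line in enumerate(lines):
--         s = line.strip()
--         if depth > 0:
--             if s.startswith("#if"):
--                 depth += 1
--             elif s.startswith("#endif"):
--                 depth -= 1
--                 if depth == 0:
--                     ranges.append((start, k + 1))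
--         elif _opens_excluded(s):
--             depth = 1
--             start = k
--     if depth > 0:
--         ranges.append((start, len(lines)))
--     return ranges
--
-- def strip_excluded_ifdefs(content: str) -> str:
--     # phase 2: keep exactly the lines whose index lies in no excluded range
--     lines = content.split("\n")
--     ranges = _excluded_ranges(lines)
--     return "\n".join(line for k, line in enumerate(lines)
--                      if not any(a <= k < b for a, b in ranges))
-- ===== Notes on version B (the rewrite author's own statement) =====
-- stated objective: alternative
-- what changed: B is two-phase: a first pass over the lines records the half-open index ranges of excluded #if/#endif blocks (depth counter plus block-start bookkeeping, unmatched openers flushed to EOF), and a second pass joins exactly the lines whose index lies in no recorded range, instead of A's single streaming pass whose skip_depth counter decides line by line what to emit.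
import Mathlib
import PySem

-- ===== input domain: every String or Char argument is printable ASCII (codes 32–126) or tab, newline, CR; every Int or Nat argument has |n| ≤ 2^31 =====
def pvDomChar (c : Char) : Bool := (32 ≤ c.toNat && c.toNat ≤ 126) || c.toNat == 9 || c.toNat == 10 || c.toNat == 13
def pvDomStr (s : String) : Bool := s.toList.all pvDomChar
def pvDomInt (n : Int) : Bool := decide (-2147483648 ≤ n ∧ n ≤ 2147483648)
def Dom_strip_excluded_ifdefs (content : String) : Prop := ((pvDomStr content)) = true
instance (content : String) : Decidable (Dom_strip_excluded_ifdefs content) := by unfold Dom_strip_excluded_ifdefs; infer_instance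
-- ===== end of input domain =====

-- B replaces A's single streaming pass (skip_depth counter) by a two-phase algorithm:
-- collect excluded [start, end) line-index ranges first, then keep the lines outside them
-- (objective: alternative decomposition, same asymptotic cost).

-- module constant EXCLUDED_IFDEFS (a Python set)
def pvExcluded : PySem.Set String :=
  PySem.Set.ofList ["_WIN32", "PDF_ENABLE_V8", "PDF_USE_SKIA", "PDF_ENABLE_XFA"]

-- ===== PORT A =====
-- the for-loop of A, state = remaining lines × skip_depth; appends become cons
def pvStripLoop : List String → Int → List String
  | [], _ => []
  | line :: rest, skip =>
    let s := PySem.Str.strip line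
    if skip > 0 then
      if PySem.Str.startswith s "#if" then pvStripLoop rest (skip + 1)
      else if PySem.Str.startswith s "#endif" then pvStripLoop rest (skip - 1)
      else pvStripLoop rest skip
    else
      let shouldSkip :=
        if PySem.Str.startswith s "#ifdef " then
          PySem.Set.contains pvExcluded (PySem.Str.strip (PySem.Str.slice s (some 7) none))
        else if PySem.Str.startswith s "#if " then
          List.any pvExcluded (fun exc => PySem.Str.isIn ("defined(" ++ exc ++ ")") s)
        else false
      if shouldSkip then pvStripLoop rest 1
      else line :: pvStripLoop rest skip

def strip_excluded_ifdefs (content : String) : String :=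
  PySem.Str.join "\n" (pvStripLoop ((PySem.Str.split? content "\n").getD []) 0)

-- ===== PORT B =====
-- _opens_excluded
def pvOpens (s : String) : Bool :=
  if PySem.Str.startswith s "#ifdef " then
    PySem.Set.contains pvExcluded (PySem.Str.strip (PySem.Str.slice s (some 7) none))
  else if PySem.Str.startswith s "#if " then
    List.any pvExcluded (fun exc => PySem.Str.isIn ("defined(" ++ exc ++ ")") s)
  else false

-- _excluded_ranges: the for-loop, state = remaining lines x k x depth x start; appends become cons
def pvPhase1 : List String → Nat → Int → Nat → List (Nat × Nat)
  | [], k, depth, start => if 0 < depth then [(start, k)] else []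
  | line :: rest, k, depth, start =>
    let s := PySem.Str.strip line
    if 0 < depth then
      if PySem.Str.startswith s "#if" then
        pvPhase1 rest (k + 1) (depth + 1) start
      else if PySem.Str.startswith s "#endif" then
        (if depth - 1 = 0 then (start, k + 1) :: pvPhase1 rest (k + 1) (depth - 1) start
         else pvPhase1 rest (k + 1) (depth - 1) start)
      else pvPhase1 rest (k + 1) depth start
    else
      if pvOpens s then pvPhase1 rest (k + 1) 1 k
      else pvPhase1 rest (k + 1) depth start

def strip_excluded_ifdefs_alt (content : String) : String :=
  let lines := (PySem.Str.split? content "\n").getD []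
  let rs := pvPhase1 lines 0 0 0
  PySem.Str.join "\n"
    (((PySem.List.enumerate lines 0).filter
        (fun p => !(rs.any (fun r => decide ((r.1 : Int) ≤ p.1) && decide (p.1 < (r.2 : Int)))))).map (·.2))

-- ===== PRECONDITION & SPEC =====
def Spec_strip_excluded_ifdefs (content : String) (out : String) : Prop := out = strip_excluded_ifdefs_alt content
instance (content : String) (out : String) : Decidable (Spec_strip_excluded_ifdefs content out) := by unfold Spec_strip_excluded_ifdefs; infer_instance

-- ===== CLAIM (what is proved, stated in full; the proofs are below) =====
def Claim_equal_strip_excluded_ifdefs : Prop := ∀ (content : String), Dom_strip_excluded_ifdefs content → Spec_strip_excluded_ifdefs content (strip_excluded_ifdefs content)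

-- ===== LEMMAS AND PROOFS =====

-- step lemmas for A's loop
theorem pvStripLoop_cons_zero (line : String) (rest : List String) :
    pvStripLoop (line :: rest) 0 =
      (if pvOpens (PySem.Str.strip line) then pvStripLoop rest 1
       else line :: pvStripLoop rest 0) := by
  rw [pvStripLoop]
  rw [if_neg (by norm_num : ¬ (0:Int) > 0)]
  rfl

theorem pvStripLoop_cons_pos (line : String) (rest : List String) (d : Int) (hd : 0 < d) :
    pvStripLoop (line :: rest) d =
      (if PySem.Str.startswith (PySem.Str.strip line) "#if" then pvStripLoop rest (d + 1)
       else if PySem.Str.startswith (PySem.Str.strip line) "#endif" then pvStripLoop rest (d - 1)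
       else pvStripLoop rest d) := by
  simp only [pvStripLoop]
  rw [if_pos (show d > 0 from hd)]

-- in skip mode phase 1's first recorded range starts at the pending block start
theorem pvHead (rest : List String) : ∀ (k : Nat) (d : Int) (s : Nat), 0 < d →
    ∃ (e : Nat) (rs' : List (Nat × Nat)), pvPhase1 rest k d s = (s, e) :: rs' ∧ k ≤ e := by
  induction rest with
  | nil =>
    intro k d s hd
    exact ⟨k, [], by simp [pvPhase1, hd], le_refl k⟩
  | cons line tl ih =>
    intro k d s hd
    rw [pvPhase1]
    rw [if_pos hd]
    by_cases h1 : PySem.Str.startswith (PySem.Str.strip line) "#if" = true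
    · rw [if_pos h1]
      obtain ⟨e, rs', he, hke⟩ := ih (k + 1) (d + 1) s (by omega)
      exact ⟨e, rs', he, by omega⟩
    · rw [if_neg h1]
      by_cases h2 : PySem.Str.startswith (PySem.Str.strip line) "#endif" = true
      · rw [if_pos h2]
        by_cases h3 : d - 1 = 0
        · rw [if_pos h3]
          exact ⟨k + 1, _, rfl, by omega⟩
        · rw [if_neg h3]
          obtain ⟨e, rs', he, hke⟩ := ih (k + 1) (d - 1) s (by omega)
          exact ⟨e, rs', he, by omega⟩
      · rw [if_neg h2]
        obtain ⟨e, rs', he, hke⟩ := ih (k + 1) d s hd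
        exact ⟨e, rs', he, by omega⟩

-- every recorded range starts at or after the pending start / the scan position
theorem pvLB (rest : List String) : ∀ (k : Nat) (d : Int) (s : Nat) (r : Nat × Nat),
    r ∈ pvPhase1 rest k d s → (0 < d → min s k ≤ r.1) ∧ (¬ 0 < d → k ≤ r.1) := by
  induction rest with
  | nil =>
    intro k d s r hr
    rw [pvPhase1] at hr
    split at hr
    · next hd =>
      rcases List.mem_singleton.1 hr with rfl
      exact ⟨fun _ => by omega, fun hnd => absurd ‹0 < d› hnd⟩
    · exact absurd hr (List.not_mem_nil)
  | cons line tl ih =>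
    intro k d s r hr
    rw [pvPhase1] at hr
    split at hr
    · next hd =>
      constructor
      swap
      · intro hnd; exact absurd hd hnd
      intro _
      split at hr
      · have := ih (k + 1) (d + 1) s r hr
        have := this.1 (by omega)
        omega
      · split at hr
        · split at hr
          · rcases List.mem_cons.1 hr with hre | hr'
            · subst hre; omega
            · have := (ih (k + 1) (d - 1) s r hr').2 (by omega)
              omega
          · next h3 =>
            have := (ih (k + 1) (d - 1) s r hr).1 (by omega)
            omega
        · have := (ih (k + 1) d s r hr).1 hd
          omega
    · next hd =>
      constructor
      · intro hd'; exact absurd hd' hd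
      intro _
      split at hr
      · have h0 := (ih (k + 1) 1 k r hr).1 one_pos
        omega
      · have := (ih (k + 1) d s r hr).2 hd
        omega

-- the main invariant: phase 1's ranges filter out exactly what A's loop drops,
-- in skip mode (first conjunct, pending block started at s ≤ k) and in normal mode (second)
theorem pv_main (rest : List String) : ∀ (k : Nat) (d : Int) (s : Nat),
    (0 < d → s ≤ k →
      ((PySem.List.enumerate rest (k : Int)).filter
          (fun p => !((pvPhase1 rest k d s).any
              (fun r => decide ((r.1 : Int) ≤ p.1) && decide (p.1 < (r.2 : Int)))))).map (·.2)
        = pvStripLoop rest d) ∧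
    (((PySem.List.enumerate rest (k : Int)).filter
          (fun p => !((pvPhase1 rest k 0 s).any
              (fun r => decide ((r.1 : Int) ≤ p.1) && decide (p.1 < (r.2 : Int)))))).map (·.2)
        = pvStripLoop rest 0) := by
  induction rest with
  | nil =>
    intro k d s
    constructor
    · intro _ _
      simp [PySem.List.enumerate, pvStripLoop]
    · simp [PySem.List.enumerate, pvStripLoop]
  | cons line tl ih =>
    intro k d s
    have hcast : ((k : Int) + 1) = ((k + 1 : Nat) : Int) := by push_cast; ring
    constructor
    · -- skip mode
      intro hd hsk
      rw [PySem.List.enumerate_cons, List.filter_cons, pvStripLoop_cons_pos line tl d hd]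
      rw [pvPhase1, if_pos hd]
      by_cases h1 : PySem.Str.startswith (PySem.Str.strip line) "#if" = true
      · rw [if_pos h1, if_pos h1]
        obtain ⟨e, rs', he, hke⟩ := pvHead tl (k + 1) (d + 1) s (by omega)
        rw [he]
        rw [if_neg (by
          simp
          intro hx
          exact absurd hx (by omega))]
        rw [hcast, ← he, (ih (k + 1) (d + 1) s).1 (by omega) (by omega)]
      · rw [if_neg h1, if_neg h1]
        by_cases h2 : PySem.Str.startswith (PySem.Str.strip line) "#endif" = true
        · rw [if_pos h2, if_pos h2]
          by_cases h3 : d - 1 = 0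
          · rw [if_pos h3]
            rw [h3]
            rw [if_neg (by
              simp
              intro hx
              exact absurd hx (by omega))]
            have hdrop : (PySem.List.enumerate tl ((k : Int) + 1)).filter
                (fun p => !((((s, k + 1) : Nat × Nat) :: pvPhase1 tl (k + 1) 0 s).any
                    (fun r => decide ((r.1 : Int) ≤ p.1) && decide (p.1 < (r.2 : Int)))))
                = (PySem.List.enumerate tl ((k : Int) + 1)).filter
                (fun p => !((pvPhase1 tl (k + 1) 0 s).any
                    (fun r => decide ((r.1 : Int) ≤ p.1) && decide (p.1 < (r.2 : Int))))) := by
              apply List.filter_congr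
              intro p hp
              rcases (PySem.List.mem_enumerate_iff _ _ _).1 hp with ⟨m, hm, hpe⟩
              subst hpe
              simp only [List.any_cons]
              have hB : decide (((k : Int) + 1 + m) < (((k + 1 : Nat) : Nat) : Int)) = false := by
                simp only [decide_eq_false_iff_not]; push_cast; omega
              rw [hB, Bool.and_false, Bool.false_or]
            rw [hdrop, hcast, (ih (k + 1) d s).2]
          · rw [if_neg h3]
            obtain ⟨e, rs', he, hke⟩ := pvHead tl (k + 1) (d - 1) s (by omega)
            rw [he]
            rw [if_neg (by
              simp
              intro hx
              exact absurd hx (by omega))]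
            rw [hcast, ← he, (ih (k + 1) (d - 1) s).1 (by omega) (by omega)]
        · rw [if_neg h2, if_neg h2]
          obtain ⟨e, rs', he, hke⟩ := pvHead tl (k + 1) d s hd
          rw [he]
          rw [if_neg (by
            simp
            intro hx
            exact absurd hx (by omega))]
          rw [hcast, ← he, (ih (k + 1) d s).1 hd (by omega)]
    · -- normal mode
      rw [PySem.List.enumerate_cons, List.filter_cons, pvStripLoop_cons_zero line tl]
      rw [pvPhase1, if_neg (by norm_num : ¬ (0:Int) < 0)]
      by_cases ho : pvOpens (PySem.Str.strip line) = true
      · rw [if_pos ho, if_pos ho]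
        obtain ⟨e, rs', he, hke⟩ := pvHead tl (k + 1) 1 k one_pos
        rw [he]
        rw [if_neg (by
          simp
          intro hx
          exact absurd hx (by omega))]
        rw [hcast, ← he, (ih (k + 1) 1 k).1 one_pos (by omega)]
      · rw [if_neg ho, if_neg ho]
        have hfalse : ((pvPhase1 tl (k + 1) 0 s).any
            (fun r => decide ((r.1 : Int) ≤ (k : Int)) && decide ((k : Int) < (r.2 : Int)))) = false := by
          rw [List.any_eq_false]
          intro r hr
          have hlb := (pvLB tl (k + 1) 0 s r hr).2 (by norm_num)
          simp only [Bool.and_eq_true, decide_eq_true_eq, not_and]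
          intro hA
          omega
        rw [if_pos (by rw [hfalse]; rfl)]
        rw [List.map_cons, hcast, (ih (k + 1) d s).2]

-- ===== VERDICT (by name: the statement is the Claim_ definition above) =====
theorem strip_excluded_ifdefs_spec : Claim_equal_strip_excluded_ifdefs := by
  intro content _
  unfold Spec_strip_excluded_ifdefs strip_excluded_ifdefs strip_excluded_ifdefs_alt
  exact (congrArg (PySem.Str.join "\n")
    ((pv_main ((PySem.Str.split? content "\n").getD []) 0 0 0).2)).symm
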